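-- pv_equiv track=rewrite | github.com/8fdafs2/Codewars-Solu-Python | src/kyu4_Design_a_Simple_Automaton.py | read_commands_01
-- ===== SOURCE A (Python) =====
-- def read_commands_01(commands):
--     """
--     intuitive
--     """
--     s = 0
--     for c in commands:
--         if c == '0':
--             if s == 1:
--                 s = 2
--             elif s == 2:
--                 s = 1
--         elif c == '1':
--             if s == 0:
--                 s = 1
--             elif s == 2:
--                 s = 1
--     return s == 1
-- ===== SOURCE B (Python) =====
-- def read_commands_01(commands):
--     # Backward scan: the DFA accepts iff the string contains a '1' and the
--     # number of '0's after the LAST '1' is even. Walk from the right, counting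
--     # '0's, and stop at the first '1' found.
--     zeros = 0
--     for c in reversed(commands):
--         if c == '1':
--             return zeros % 2 == 0
--         if c == '0':
--             zeros += 1
--     return False
-- ===== Notes on version B (the rewrite author's own statement) =====
-- stated objective: alternative
-- what changed: Replaces the forward 3-state DFA pass by a backward scan that counts '0's from the right and terminates early at the first '1', returning the parity of that trailing-zero count.
import Mathlib
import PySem

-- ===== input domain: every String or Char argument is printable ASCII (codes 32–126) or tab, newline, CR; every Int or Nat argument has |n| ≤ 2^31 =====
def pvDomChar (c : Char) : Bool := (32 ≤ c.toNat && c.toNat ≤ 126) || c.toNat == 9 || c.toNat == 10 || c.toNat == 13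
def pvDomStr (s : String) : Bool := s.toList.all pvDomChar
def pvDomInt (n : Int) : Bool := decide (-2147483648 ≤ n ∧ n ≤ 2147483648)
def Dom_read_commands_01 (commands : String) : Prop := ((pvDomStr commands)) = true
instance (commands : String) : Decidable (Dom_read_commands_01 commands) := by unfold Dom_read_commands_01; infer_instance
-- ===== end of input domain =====

-- B replaces the forward 3-state DFA pass by a backward scan that counts '0's
-- from the right and stops at the first '1' (alternative decomposition, same cost).


-- ===== PORT A =====
def read_commands_01 (commands : String) : Bool :=
  let s := commands.toList.foldl (fun (s : Int) c =>
    if c = '0' then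
      if s = 1 then 2 else if s = 2 then 1 else s
    else if c = '1' then
      if s = 0 then 1 else if s = 2 then 1 else s
    else s) 0
  s == 1

-- ===== PORT B =====
-- loop over reversed(commands) with early return at the first '1'
def pvAltGo : List Char → Int → Bool
  | [], _ => false
  | c :: rest, zeros =>
      if c = '1' then zeros % 2 == 0
      else pvAltGo rest (if c = '0' then zeros + 1 else zeros)

def read_commands_01_alt (commands : String) : Bool :=
  pvAltGo commands.toList.reverse 0

-- ===== PRECONDITION & SPEC =====
def Spec_read_commands_01 (commands : String) (out : Bool) : Prop := out = read_commands_01_alt commands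
instance (commands : String) (out : Bool) : Decidable (Spec_read_commands_01 commands out) := by unfold Spec_read_commands_01; infer_instance

-- ===== CLAIM (what is proved, stated in full; the proofs are below) =====
def Claim_equal_read_commands_01 : Prop := ∀ (commands : String), Dom_read_commands_01 commands → Spec_read_commands_01 commands (read_commands_01 commands)

-- ===== LEMMAS AND PROOFS =====
def pvStepA (s : Int) (c : Char) : Int :=
  if c = '0' then
    if s = 1 then 2 else if s = 2 then 1 else s
  else if c = '1' then
    if s = 0 then 1 else if s = 2 then 1 else s
  else s

-- the value of B's backward loop, expressed from A's final state and the pending zero count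
def pvF (s : Int) (z : Int) : Bool :=
  if s = 0 then false else if s = 1 then z % 2 == 0 else z % 2 == 1

theorem pvState_mem (l : List Char) (s : Int) (h : s = 0 ∨ s = 1 ∨ s = 2) :
    l.foldl pvStepA s = 0 ∨ l.foldl pvStepA s = 1 ∨ l.foldl pvStepA s = 2 := by
  induction l generalizing s with
  | nil => exact h
  | cons c l ih =>
      apply ih
      by_cases h0 : c = '0' <;> by_cases h1 : c = '1' <;>
        rcases h with h | h | h <;> simp [pvStepA, h0, h1, h]

theorem pvAltGo_eq (m : List Char) (z : Int) :
    pvAltGo m z = pvF (m.reverse.foldl pvStepA 0) z := by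
  induction m generalizing z with
  | nil => simp [pvAltGo, pvF]
  | cons c m ih =>
      have hmem := pvState_mem m.reverse 0 (Or.inl rfl)
      set S := m.reverse.foldl pvStepA 0 with hS
      rw [List.reverse_cons, List.foldl_append, ← hS]
      by_cases h1 : c = '1'
      · rcases hmem with h | h | h <;>
          simp [pvAltGo, pvStepA, pvF, h1, h]
      · by_cases h0 : c = '0'
        · rw [show pvAltGo (c :: m) z = pvAltGo m (z + 1) by simp [pvAltGo, h0]]
          rw [ih]
          rcases hmem with h | h | h <;> simp [pvStepA, pvF, h0, h] <;> omega
        · rw [show pvAltGo (c :: m) z = pvAltGo m z by simp [pvAltGo, h0, h1]]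
          rw [ih]
          simp [pvStepA, h0, h1]

-- ===== VERDICT (by name: the statement is the Claim_ definition above) =====
theorem read_commands_01_spec : Claim_equal_read_commands_01 := by
  intro commands _
  unfold Spec_read_commands_01 read_commands_01 read_commands_01_alt
  rw [pvAltGo_eq]
  simp only [List.reverse_reverse]
  have hmem := pvState_mem commands.toList 0 (Or.inl rfl)
  show (commands.toList.foldl pvStepA 0 == 1) = pvF (commands.toList.foldl pvStepA 0) 0
  rcases hmem with h | h | h <;> simp [pvF, h]
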